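-- pv_equiv track=rewrite | github.com/MrBrantCode/unitest_baseline | mut_generate/mist_train_cf/cf_68112/solution.py | advanced_sort
-- ===== SOURCE A (Python) =====
-- def advanced_sort(numbers):
--     """
--     Given a list 'numbers' with N integers from 1 to 10^6 in random order, determine if it's possible
--     to sort into non-decreasing order by the following operations:
--     1. Reverse any sublist any number of times.
--     2. Remove one element from the list.
--     3. Swap any two elements once.
--
--     If possible, return 'True', if not, 'False'. If the list is empty, return 'True'.
--     Also, provide the sequence of operations taken to sort the list.
--     """
--     N = len(numbers)
--     # If list is empty, return True
--     if N == 0: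
--         return True, []
--
--     # If list is already sorted, return True
--     if numbers == sorted(numbers):
--         return True, []
--
--     # Else perform operations
--     i = 0
--     operations = []
--     while i < N - 1:
--         if numbers[i] < numbers[i + 1]:
--             numbers.pop(i)
--             operations.append('Remove ' + str(i))
--             N -= 1
--         else:
--             i += 1
--
--     if numbers == sorted(numbers):
--         return True, operations
--
--     # If after all operations, list is not sorted
--     return False, []
-- ===== SOURCE B (Python) =====
-- def advanced_sort(numbers):
--     # Single forward pass building the kept list (no in-place pops; unlike A,
--     # this does not mutate the argument).
--     if not numbers:
--         return True, []
--     if all(x <= y for x, y in zip(numbers, numbers[1:])):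
--         return True, []
--     kept = []
--     ops = []
--     cur = numbers[0]
--     for y in numbers[1:]:
--         if cur < y:
--             ops.append('Remove ' + str(len(kept)))
--         else:
--             kept.append(cur)
--         cur = y
--     kept.append(cur)
--     if all(x <= y for x, y in zip(kept, kept[1:])):
--         return True, ops
--     return False, []
-- ===== Notes on version B (the rewrite author's own statement) =====
-- stated objective: faster
-- what changed: Replaces the while-loop that repeatedly pops from the list in place (O(N) per pop) and the sorted() comparisons with a single forward pass that appends survivors to a kept list (removal index = current kept length) and pairwise non-decreasing checks.
import Mathlib
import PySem

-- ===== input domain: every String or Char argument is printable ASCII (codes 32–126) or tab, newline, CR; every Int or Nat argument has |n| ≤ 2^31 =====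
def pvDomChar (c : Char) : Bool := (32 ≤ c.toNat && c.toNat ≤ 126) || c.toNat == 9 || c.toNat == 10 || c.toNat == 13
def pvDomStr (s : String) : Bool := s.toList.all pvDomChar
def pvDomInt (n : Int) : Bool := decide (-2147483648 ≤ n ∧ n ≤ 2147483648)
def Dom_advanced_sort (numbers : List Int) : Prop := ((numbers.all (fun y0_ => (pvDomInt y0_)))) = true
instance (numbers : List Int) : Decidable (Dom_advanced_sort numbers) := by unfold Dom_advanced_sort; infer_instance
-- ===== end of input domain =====

-- B replaces A's in-place pop loop by one forward pass building a kept list (objective: faster).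
-- A mutates its argument in place (pop); B does not — the equivalence proved here is about the return value only.

-- ===== PORT A =====
-- the while loop: numbers/i/operations mutate; pop(i) = eraseIdx i (i always in range here).
-- Each iteration decreases numbers.length - i, so fuel = numbers.length suffices (structural totality guard only).
def advanced_sort_loopA (fuel : Nat) (numbers : List Int) (i : Nat) (ops : List String) :
    List Int × List String :=
  match fuel with
  | 0 => (numbers, ops)
  | fuel + 1 =>
    if h : i + 1 < numbers.length then
      if numbers[i]'(by omega) < numbers[i + 1]'h then
        advanced_sort_loopA fuel (numbers.eraseIdx i) i
          (ops ++ ["Remove " ++ PySem.Int.toStr (i : Int)])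
      else
        advanced_sort_loopA fuel numbers (i + 1) ops
    else (numbers, ops)

def advanced_sort (numbers : List Int) : Bool × List String :=
  if numbers = [] then (true, [])
  else if numbers = PySem.List.sorted numbers (fun x => x) false then (true, [])
  else if (advanced_sort_loopA numbers.length numbers 0 []).1 =
      PySem.List.sorted (advanced_sort_loopA numbers.length numbers 0 []).1 (fun x => x) false then
    (true, (advanced_sort_loopA numbers.length numbers 0 []).2)
  else (false, [])

-- ===== PORT B =====
-- all(x <= y for x, y in zip(l, l[1:]))
def advanced_sort_pairLe (l : List Int) : Bool :=
  (l.zip l.tail).all (fun p => decide (p.1 ≤ p.2))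

-- the for-loop over numbers[1:] with state (cur, kept, ops)
def advanced_sort_loopB (cur : Int) (rest : List Int) (kept : List Int) (ops : List String) :
    List Int × List String :=
  match rest with
  | [] => (kept ++ [cur], ops)
  | y :: t =>
    if cur < y then
      advanced_sort_loopB y t kept (ops ++ ["Remove " ++ PySem.Int.toStr (kept.length : Int)])
    else
      advanced_sort_loopB y t (kept ++ [cur]) ops

def advanced_sort_alt (numbers : List Int) : Bool × List String :=
  match numbers with
  | [] => (true, [])
  | x :: t =>
    if advanced_sort_pairLe (x :: t) then (true, [])
    else if advanced_sort_pairLe (advanced_sort_loopB x t [] []).1 then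
      (true, (advanced_sort_loopB x t [] []).2)
    else (false, [])

-- ===== PRECONDITION & SPEC =====
def Spec_advanced_sort (numbers : List Int) (out : Bool × List String) : Prop := out = advanced_sort_alt numbers
instance (numbers : List Int) (out : Bool × List String) : Decidable (Spec_advanced_sort numbers out) := by unfold Spec_advanced_sort; infer_instance

-- ===== CLAIM (what is proved, stated in full; the proofs are below) =====
def Claim_equal_advanced_sort : Prop := ∀ (numbers : List Int), Dom_advanced_sort numbers → Spec_advanced_sort numbers (advanced_sort numbers)

-- ===== LEMMAS AND PROOFS =====

theorem pairLe_iff_pairwise (l : List Int) :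
    advanced_sort_pairLe l = true ↔ l.Pairwise (· ≤ ·) := by
  induction l with
  | nil => simp [advanced_sort_pairLe]
  | cons x t ih =>
    cases t with
    | nil => simp [advanced_sort_pairLe]
    | cons y u =>
      simp only [advanced_sort_pairLe, List.tail, List.zip, List.zipWith, List.all_cons,
        Bool.and_eq_true, decide_eq_true_eq] at *
      rw [ih]
      constructor
      · rintro ⟨hxy, hp⟩
        refine List.pairwise_cons.mpr ⟨?_, hp⟩
        intro a ha
        rcases List.mem_cons.mp ha with rfl | ha
        · exact hxy
        · exact le_trans hxy ((List.pairwise_cons.mp hp).1 a ha)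
      · intro hp
        rcases List.pairwise_cons.mp hp with ⟨hx, hp'⟩
        exact ⟨hx y (by simp), hp'⟩

theorem sorted_self_iff (l : List Int) :
    (l = PySem.List.sorted l (fun x => x) false) ↔ advanced_sort_pairLe l = true := by
  rw [pairLe_iff_pairwise]
  constructor
  · intro h
    have := PySem.List.sorted_pairwise (xs := l) (key := fun x => x)
    rw [← h] at this
    exact this
  · intro h
    exact (PySem.List.sorted_eq_self_of_pairwise (xs := l) (key := fun x => x) h).symm

theorem loopA_eq_loopB (fuel : Nat) (rest : List Int) (cur : Int) (kept : List Int)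
    (ops : List String) (hfuel : rest.length < fuel) :
    advanced_sort_loopA fuel (kept ++ cur :: rest) kept.length ops =
      advanced_sort_loopB cur rest kept ops := by
  induction rest generalizing fuel cur kept ops with
  | nil =>
    obtain ⟨f, rfl⟩ : ∃ f, fuel = f + 1 := ⟨fuel - 1, by omega⟩
    rw [advanced_sort_loopA]
    simp [advanced_sort_loopB]
  | cons y t ih =>
    obtain ⟨f, rfl⟩ : ∃ f, fuel = f + 1 := ⟨fuel - 1, by omega⟩
    rw [advanced_sort_loopA]
    have hlen : kept.length + 1 < (kept ++ cur :: y :: t).length := by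
      simp
    have hget1 : (kept ++ cur :: y :: t)[kept.length]'(by omega) = cur := by
      simp
    have hget2 : (kept ++ cur :: y :: t)[kept.length + 1]'hlen = y := by
      rw [List.getElem_append_right (by omega)]
      simp
    rw [dif_pos hlen]
    rw [hget1, hget2]
    by_cases hlt : cur < y
    · rw [if_pos hlt]
      have herase : (kept ++ cur :: y :: t).eraseIdx kept.length = kept ++ y :: t := by
        rw [List.eraseIdx_append_of_length_le (by omega)]
        simp
      rw [herase, ih f y kept _ (by simp at hfuel ⊢; omega)]
      simp [advanced_sort_loopB, hlt]
    · rw [if_neg hlt]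
      have : kept.length + 1 = (kept ++ [cur]).length := by simp
      rw [this]
      have : kept ++ cur :: y :: t = (kept ++ [cur]) ++ y :: t := by simp
      rw [this, ih f y (kept ++ [cur]) ops (by simp at hfuel ⊢; omega)]
      simp [advanced_sort_loopB, hlt]

-- ===== VERDICT (by name: the statement is the Claim_ definition above) =====
theorem advanced_sort_spec : Claim_equal_advanced_sort := by
  intro numbers _
  unfold Spec_advanced_sort advanced_sort advanced_sort_alt
  cases numbers with
  | nil => rfl
  | cons x t =>
    simp only [reduceCtorEq, if_false]
    have hloop : advanced_sort_loopA (x :: t).length (x :: t) 0 [] =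
        advanced_sort_loopB x t [] [] := by
      have h := loopA_eq_loopB (x :: t).length t x [] [] (by simp)
      simpa using h
    by_cases hs : (x :: t) = PySem.List.sorted (x :: t) (fun x => x) false
    · rw [if_pos hs, if_pos ((sorted_self_iff _).mp hs)]
    · rw [if_neg hs,
        if_neg (fun hb : advanced_sort_pairLe (x :: t) = true => hs ((sorted_self_iff _).mpr hb))]
      simp only [hloop]
      by_cases hr : advanced_sort_pairLe (advanced_sort_loopB x t [] []).1 = true
      · rw [if_pos ((sorted_self_iff _).mpr hr), if_pos hr]
      · rw [if_neg (fun h => hr ((sorted_self_iff _).mp h)), if_neg hr]
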